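-- pv_equiv track=rewrite | github.com/PiyushKumar-in/pdf_con | backend/server.py | mergedNames
-- ===== SOURCE A (Python) =====
-- def mergedNames(data):
--     dataMerged = []
--     for i in data:
--         if (len(dataMerged)==0) or (dataMerged[-1]["name"]!=i["name"]) or ("0" in ["page"]):
--             dataMerged.append(i)
--         else:
--             dataMerged[-1]["page"] += " " + i["page"]
--     return dataMerged
-- ===== SOURCE B (Python) =====
-- def mergedNames(data):
--     result = []
--     n = len(data)
--     i = 0
--     while i < n:
--         rep = data[i]
--         j = i + 1
--         while j < n and data[j]["name"] == rep["name"]: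
--             rep["page"] += " " + data[j]["page"]
--             j += 1
--         result.append(rep)
--         i = j
--     return result
-- ===== Notes on version B (the rewrite author's own statement) =====
-- stated objective: alternative
-- what changed: B replaces A's single pass that compares each item against the tail of the growing output list (appending or rewriting the last output dict) with an explicit run-grouping scan: an outer loop picks the first dict of each consecutive same-name run as representative and an inner loop folds the following pages into it; the always-False ('0' in ['page']) term is dropped.
import Mathlib
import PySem

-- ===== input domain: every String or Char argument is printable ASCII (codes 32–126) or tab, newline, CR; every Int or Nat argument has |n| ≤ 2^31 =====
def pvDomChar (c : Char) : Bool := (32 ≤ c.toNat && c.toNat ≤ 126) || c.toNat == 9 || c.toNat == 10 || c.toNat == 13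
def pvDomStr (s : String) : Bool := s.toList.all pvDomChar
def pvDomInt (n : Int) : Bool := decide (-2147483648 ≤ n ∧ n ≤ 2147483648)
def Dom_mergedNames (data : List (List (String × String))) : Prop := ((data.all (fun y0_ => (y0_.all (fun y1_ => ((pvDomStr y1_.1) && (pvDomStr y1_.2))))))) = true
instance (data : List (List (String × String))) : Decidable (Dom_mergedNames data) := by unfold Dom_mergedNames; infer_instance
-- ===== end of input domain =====

-- B is a run-based rewrite (group consecutive equal names, fold each run into its first dict)
-- instead of A's compare-against-the-output-tail single pass; same return value on Pre_.
-- Both Pythons mutate the first dict of each run in place identically; the theorems here are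
-- about the RETURN value (which contains those mutated dicts).

-- dict primitives on the association-list model of a Python dict (first-match lookup,
-- overwrite in place); d[k] with a missing key raises KeyError in Python — Pre_ excludes that,
-- so the ports use a "" default there.
def pvGetD (d : List (String × String)) (k : String) : String :=
  match d with
  | [] => ""
  | (k', v) :: rest => if k' = k then v else pvGetD rest k

-- d[k] = v : overwrite the first binding of k in place, else append
def pvSet (d : List (String × String)) (k v : String) : List (String × String) :=
  match d with
  | [] => [(k, v)]
  | (k', v') :: rest => if k' = k then (k', v) :: rest else (k', v') :: pvSet rest k v

-- ===== PORT A =====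
def mergedNames (data : List (List (String × String))) : List (List (String × String)) :=
  data.foldl (fun dataMerged i =>
    if dataMerged.length = 0 ∨
       pvGetD ((PySem.List.pyGet? dataMerged (-1)).getD []) "name" ≠ pvGetD i "name" ∨
       ("0" ∈ (["page"] : List String)) then
      dataMerged ++ [i]
    else
      dataMerged.dropLast ++
        [pvSet ((PySem.List.pyGet? dataMerged (-1)).getD []) "page"
          (pvGetD ((PySem.List.pyGet? dataMerged (-1)).getD []) "page" ++ " " ++ pvGetD i "page")])
    []

-- ===== PORT B =====
-- inner while loop of B: consume the run of dicts whose "name" equals rep's, folding pages into rep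
def pvMergeRun (rep : List (String × String)) (rest : List (List (String × String))) :
    List (String × String) × List (List (String × String)) :=
  match rest with
  | [] => (rep, [])
  | j :: rest' =>
    if pvGetD j "name" = pvGetD rep "name" then
      pvMergeRun (pvSet rep "page" (pvGetD rep "page" ++ " " ++ pvGetD j "page")) rest'
    else (rep, j :: rest')

theorem pvMergeRun_snd_le : ∀ (rest : List (List (String × String))) (rep : List (String × String)),
    (pvMergeRun rep rest).2.length ≤ rest.length := by
  intro rest
  induction rest with
  | nil => intro rep; simp [pvMergeRun]
  | cons j rest' ih =>
    intro rep
    simp only [pvMergeRun]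
    split
    · exact le_trans (ih _) (Nat.le_succ _)
    · simp

-- outer while loop of B: emit one representative per run
def mergedNames_alt (data : List (List (String × String))) : List (List (String × String)) :=
  match data with
  | [] => []
  | i :: rest => (pvMergeRun i rest).1 :: mergedNames_alt (pvMergeRun i rest).2
termination_by data.length
decreasing_by simpa using Nat.lt_succ_of_le (pvMergeRun_snd_le rest i)

-- ===== PRECONDITION & SPEC =====
-- Pre_ = exactly the inputs where Python A returns (no KeyError): with two or more dicts every
-- dict has a "name" key (a singleton's name is never read, the `or` short-circuits), and whenever
-- two consecutive dicts carry equal names (so a merge happens) both have a "page" key.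
def Pre_mergedNames (data : List (List (String × String))) : Prop :=
  (data.length ≤ 1 ∨ ∀ d ∈ data, ("name" ∈ d.map Prod.fst)) ∧
  (∀ q ∈ data.zip data.tail,
     q.1.lookup "name" = q.2.lookup "name" →
       ("page" ∈ q.1.map Prod.fst) ∧ ("page" ∈ q.2.map Prod.fst))
instance (data : List (List (String × String))) : Decidable (Pre_mergedNames data) := by
  unfold Pre_mergedNames; infer_instance

def pvWitness_mergedNames : (List (List (String × String))) :=
  [[("name", "a"), ("page", "1")], [("name", "a"), ("page", "2")], [("name", "b")]]

def Spec_mergedNames (data : List (List (String × String))) (out : List (List (String × String))) : Prop := out = mergedNames_alt data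
instance (data : List (List (String × String))) (out : List (List (String × String))) : Decidable (Spec_mergedNames data out) := by unfold Spec_mergedNames; infer_instance

-- ===== CLAIM (what is proved, stated in full; the proofs are below) =====
def Claim_equal_mergedNames : Prop := ∀ (data : List (List (String × String))), Dom_mergedNames data → Pre_mergedNames data → Spec_mergedNames data (mergedNames data)

-- ===== LEMMAS AND PROOFS =====

theorem pvLast_append (acc : List (List (String × String))) (rep : List (String × String)) :
    (PySem.List.pyGet? (acc ++ [rep]) (-1)).getD [] = rep := by
  simp [PySem.List.pyGet?, PySem.List.pyIdx?]

theorem pvMergeRun_pos (i rep : List (String × String)) (rest : List (List (String × String)))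
    (h : pvGetD i "name" = pvGetD rep "name") :
    pvMergeRun rep (i :: rest)
      = pvMergeRun (pvSet rep "page" (pvGetD rep "page" ++ " " ++ pvGetD i "page")) rest := by
  simp [pvMergeRun, h]

theorem pvMergeRun_neg (i rep : List (String × String)) (rest : List (List (String × String)))
    (h : ¬ pvGetD i "name" = pvGetD rep "name") :
    pvMergeRun rep (i :: rest) = (rep, i :: rest) := by
  simp [pvMergeRun, h]

theorem alt_nil : mergedNames_alt [] = [] := by unfold mergedNames_alt; rfl

theorem alt_cons (i : List (String × String)) (rest : List (List (String × String))) :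
    mergedNames_alt (i :: rest)
      = (pvMergeRun i rest).1 :: mergedNames_alt (pvMergeRun i rest).2 := by
  conv_lhs => rw [mergedNames_alt.eq_def]

-- A's fold started from acc ++ [rep] computes acc ++ (B's run recursion started at rep)
theorem pvFold_run :
    ∀ (data acc : List (List (String × String))) (rep : List (String × String)),
      List.foldl (fun dataMerged i =>
        if dataMerged.length = 0 ∨
           pvGetD ((PySem.List.pyGet? dataMerged (-1)).getD []) "name" ≠ pvGetD i "name" ∨
           ("0" ∈ (["page"] : List String)) then
          dataMerged ++ [i]
        else
          dataMerged.dropLast ++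
            [pvSet ((PySem.List.pyGet? dataMerged (-1)).getD []) "page"
              (pvGetD ((PySem.List.pyGet? dataMerged (-1)).getD []) "page" ++ " " ++ pvGetD i "page")])
        (acc ++ [rep]) data
      = acc ++ (pvMergeRun rep data).1 :: mergedNames_alt (pvMergeRun rep data).2 := by
  intro data
  induction data with
  | nil => intro acc rep; simp [pvMergeRun, alt_nil]
  | cons i rest ih =>
    intro acc rep
    rw [List.foldl_cons]
    by_cases hname : pvGetD i "name" = pvGetD rep "name"
    · -- merge branch: A rewrites its last element; B folds i into rep
      have hcond : ¬ ((acc ++ [rep]).length = 0 ∨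
          pvGetD ((PySem.List.pyGet? (acc ++ [rep]) (-1)).getD []) "name" ≠ pvGetD i "name" ∨
          ("0" ∈ (["page"] : List String))) := by
        simp [hname.symm]
      rw [if_neg hcond]
      have hdrop : (acc ++ [rep]).dropLast = acc := by simp
      rw [hdrop, pvLast_append]
      rw [ih acc (pvSet rep "page" (pvGetD rep "page" ++ " " ++ pvGetD i "page"))]
      rw [pvMergeRun_pos i rep rest hname]
    · -- new run: A appends i; B closes the run at rep
      have hcond : ((acc ++ [rep]).length = 0 ∨
          pvGetD ((PySem.List.pyGet? (acc ++ [rep]) (-1)).getD []) "name" ≠ pvGetD i "name" ∨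
          ("0" ∈ (["page"] : List String))) := by
        right; left; rw [pvLast_append]; exact fun h => hname h.symm
      rw [if_pos hcond]
      rw [ih (acc ++ [rep]) i, pvMergeRun_neg i rep rest hname, alt_cons]
      simp

-- ===== VERDICT (by name: the statement is the Claim_ definition above) =====
theorem mergedNames_spec : Claim_equal_mergedNames := by
  intro data _ _
  unfold Spec_mergedNames mergedNames
  cases data with
  | nil => rw [alt_nil]; rfl
  | cons i rest =>
    rw [List.foldl_cons, if_pos (by simp), pvFold_run rest [] i, alt_cons]
    rfl
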